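-- pv_equiv track=rewrite | github.com/dyingg/rk311_infowise-pub- | src/main/scraper-module/live_blacklist.py | match_lists
-- ===== SOURCE A (Python) =====
-- def match_lists(name, old_list, new_list):
--     old_map = {i: True for i in old_list}
--     new_map = {i: True for i in new_list}
--     logs = []
--     old, new = [], []
--
--     removed = 0
--     for i in old_map:
--         if i not in new_map:
--             removed += 1
--         old.append(i)
--
--     logs.append("{} has removed {} IP addresses from their database".format(name, removed))
--
--     added = 0
--     for i in new_map:
--         if i not in old_map:
--             added += 1
--         new.append(i)
--
--     logs.append("{} has added {} IP addresses to their database".format(name, added))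
--
--     return old, new, logs
-- ===== SOURCE B (Python) =====
-- def match_lists(name, old_list, new_list):
--     old = list(dict.fromkeys(old_list))
--     new = list(dict.fromkeys(new_list))
--
--     # Count one-sided differences by a two-pointer merge of the SORTED distinct
--     # values: no counting loops over hash maps.
--     def missing(a, b):
--         i = j = c = 0
--         while i < len(a) and j < len(b):
--             if a[i] < b[j]:
--                 c += 1
--                 i += 1
--             elif b[j] < a[i]:
--                 j += 1
--             else:
--                 i += 1
--                 j += 1
--         return c + (len(a) - i)
--
--     sorted_old = sorted(set(old_list))
--     sorted_new = sorted(set(new_list))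
--     removed = missing(sorted_old, sorted_new)
--     added = missing(sorted_new, sorted_old)
--     logs = [
--         "{} has removed {} IP addresses from their database".format(name, removed),
--         "{} has added {} IP addresses to their database".format(name, added),
--     ]
--     return old, new, logs
-- ===== Notes on version B (the rewrite author's own statement) =====
-- stated objective: alternative
-- what changed: A's counting loops over the dedupe dicts are replaced by a sort-then-scan algorithm: the distinct values of each side are sorted and a two-pointer merge of the two sorted lists counts the removed/added addresses; the deduped outputs come straight from dict.fromkeys.
import Mathlib
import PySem

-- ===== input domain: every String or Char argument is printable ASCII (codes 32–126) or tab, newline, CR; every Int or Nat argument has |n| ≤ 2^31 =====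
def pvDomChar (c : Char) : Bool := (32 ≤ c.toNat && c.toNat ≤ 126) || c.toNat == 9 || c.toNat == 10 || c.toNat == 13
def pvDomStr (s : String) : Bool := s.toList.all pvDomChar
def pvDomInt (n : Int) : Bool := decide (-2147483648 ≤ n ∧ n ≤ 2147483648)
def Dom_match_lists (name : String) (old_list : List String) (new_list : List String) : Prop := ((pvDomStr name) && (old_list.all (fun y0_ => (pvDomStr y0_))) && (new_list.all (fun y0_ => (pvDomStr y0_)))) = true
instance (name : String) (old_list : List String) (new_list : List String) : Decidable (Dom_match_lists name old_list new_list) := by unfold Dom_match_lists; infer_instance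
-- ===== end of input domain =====

-- B replaces A's counting loops over dedupe dicts by sort-then-scan: a two-pointer
-- merge of the sorted distinct values counts removed/added; dedup via dict.fromkeys.


-- ===== PORT A =====
def match_lists (name : String) (old_list : List String) (new_list : List String) : List String × List String × List String :=
  let old_map : PySem.Dict String Bool := old_list.foldl (fun d i => d.insert i true) PySem.Dict.empty
  let new_map : PySem.Dict String Bool := new_list.foldl (fun d i => d.insert i true) PySem.Dict.empty
  let ro : Int × List String :=
    old_map.keys.foldl (fun p i => (if !new_map.contains i then p.1 + 1 else p.1, p.2 ++ [i])) (0, [])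
  let log1 : String := name ++ " has removed " ++ PySem.Int.toStr ro.1 ++ " IP addresses from their database"
  let an : Int × List String :=
    new_map.keys.foldl (fun p i => (if !old_map.contains i then p.1 + 1 else p.1, p.2 ++ [i])) (0, [])
  let log2 : String := name ++ " has added " ++ PySem.Int.toStr an.1 ++ " IP addresses to their database"
  (ro.2, an.2, [log1, log2])

-- ===== PORT B =====
-- Source B's `missing`: two-pointer merge of two sorted lists, counting elements of
-- the first absent from the second (the pointers become structural recursion).
def mergeMiss : List String → List String → Int
  | [], _ => 0
  | x :: xs, [] => (x :: xs).length
  | x :: xs, y :: ys =>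
    if x < y then 1 + mergeMiss xs (y :: ys)
    else if y < x then mergeMiss (x :: xs) ys
    else mergeMiss xs ys
termination_by a b => a.length + b.length

def match_lists_alt (name : String) (old_list : List String) (new_list : List String) : List String × List String × List String :=
  let old : List String := PySem.List.dedup old_list
  let new : List String := PySem.List.dedup new_list
  let sorted_old : List String := PySem.List.sorted (PySem.Set.ofList old_list) (fun x => x) false
  let sorted_new : List String := PySem.List.sorted (PySem.Set.ofList new_list) (fun x => x) false
  let removed : Int := mergeMiss sorted_old sorted_new
  let added : Int := mergeMiss sorted_new sorted_old
  (old, new,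
    [name ++ " has removed " ++ PySem.Int.toStr removed ++ " IP addresses from their database",
     name ++ " has added " ++ PySem.Int.toStr added ++ " IP addresses to their database"])

-- ===== PRECONDITION & SPEC =====
def Spec_match_lists (name : String) (old_list : List String) (new_list : List String) (out : List String × List String × List String) : Prop := out = match_lists_alt name old_list new_list
instance (name : String) (old_list : List String) (new_list : List String) (out : List String × List String × List String) : Decidable (Spec_match_lists name old_list new_list out) := by unfold Spec_match_lists; infer_instance

-- ===== CLAIM (what is proved, stated in full; the proofs are below) =====
def Claim_equal_match_lists : Prop := ∀ (name : String) (old_list : List String) (new_list : List String), Dom_match_lists name old_list new_list → Spec_match_lists name old_list new_list (match_lists name old_list new_list)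

-- ===== LEMMAS AND PROOFS =====

-- keys of A's dedupe dict
lemma pvKeys (l : List String) :
    (l.foldl (fun d i => d.insert i true) (PySem.Dict.empty : PySem.Dict String Bool)).keys
      = PySem.Set.ofList l := by
  rw [PySem.Dict.keys_foldl_insert l (fun _ _ => true)]
  simp [PySem.Set.update, PySem.Set.ofList, PySem.Dict.keys_empty]

-- dict membership is list membership
lemma pvContains (l : List String) (i : String) :
    (l.foldl (fun d i => d.insert i true) (PySem.Dict.empty : PySem.Dict String Bool)).contains i
      = l.contains i := by
  have h1 : (l.foldl (fun d i => d.insert i true) (PySem.Dict.empty : PySem.Dict String Bool)).contains i = true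
      ↔ i ∈ l := by
    rw [PySem.Dict.contains_iff_mem_keys, pvKeys, PySem.Set.mem_ofList]
  by_cases hm : i ∈ l
  · simp [h1.mpr hm, hm]
  · rcases h : (l.foldl (fun d i => d.insert i true) (PySem.Dict.empty : PySem.Dict String Bool)).contains i
    · simp [h, hm]
    · exact absurd (h1.mp h) hm

-- A's count-and-append loop, characterised
lemma pvLoop (d : PySem.Dict String Bool) (ks : List String) :
    ks.foldl (fun (p : Int × List String) i => (if !d.contains i then p.1 + 1 else p.1, p.2 ++ [i])) (0, [])
      = ((ks.countP (fun i => !d.contains i) : Int), ks) := by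
  rw [PySem.List.foldl_prod_mk (fun a i => if !d.contains i then a + 1 else a) (fun b i => b ++ [i]) ks 0 []]
  rw [PySem.List.foldl_count_if (fun i => !d.contains i) ks 0,
      PySem.List.foldl_append_singleton ks []]
  simp

-- the two-pointer merge on strictly sorted lists counts the elements of the
-- first list absent from the second
lemma pvMerge (a b : List String) (ha : a.Pairwise (· < ·)) (hb : b.Pairwise (· < ·)) :
    mergeMiss a b = (a.countP (fun x => !b.contains x) : Nat) := by
  induction a, b using mergeMiss.induct with
  | case1 b => simp [mergeMiss]
  | case2 x xs => simp [mergeMiss]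
  | case3 x xs y ys hxy ih =>
    have hx : ¬ (y :: ys).contains x = true := by
      simp only [List.contains_eq_mem, decide_eq_true_eq, List.mem_cons]
      rintro (e | hmem)
      · exact absurd e.symm (ne_of_gt hxy)
      · rcases hb with _ | ⟨hy, _⟩
        exact absurd (lt_trans hxy (hy _ hmem)) (lt_irrefl x)
    rw [mergeMiss, if_pos hxy]
    rw [ih (List.Pairwise.sublist (List.sublist_cons_self x xs) ha) hb, List.countP_cons]
    have hpx : (!(y :: ys).contains x) = true := by
      rw [eq_false_of_ne_true hx]
      rfl
    rw [hpx]
    simp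
    omega
  | case4 x xs y ys hxy hyx ih =>
    have hdrop : (x :: xs).countP (fun z => !(y :: ys).contains z)
        = (x :: xs).countP (fun z => !ys.contains z) := by
      apply List.countP_congr
      intro z hz
      have hxz : x ≤ z := by
        rcases List.mem_cons.mp hz with e | hmem
        · exact le_of_eq e.symm
        · rcases ha with _ | ⟨hx', _⟩
          exact le_of_lt (hx' _ hmem)
      have : z ≠ y := ne_of_gt (lt_of_lt_of_le hyx hxz)
      simp [List.contains_eq_mem, this]
    rw [mergeMiss, if_neg (by exact fun h => absurd (lt_trans h hyx) (lt_irrefl x)), if_pos hyx]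
    rw [ih ha (List.Pairwise.sublist (List.sublist_cons_self y ys) hb), hdrop]
  | case5 x xs y ys hxy hyx ih =>
    have e : x = y := le_antisymm (le_of_not_gt hyx) (le_of_not_gt hxy)
    have hx : (y :: ys).contains x = true := by
      simp [List.contains_eq_mem, e]
    have hdrop : xs.countP (fun z => !(y :: ys).contains z)
        = xs.countP (fun z => !ys.contains z) := by
      apply List.countP_congr
      intro z hz
      rcases ha with _ | ⟨hx', _⟩
      have : z ≠ y := ne_of_gt (e ▸ hx' _ hz)
      simp [List.contains_eq_mem, this]
    rw [mergeMiss, if_neg hxy, if_neg hyx]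
    rw [ih (List.Pairwise.sublist (List.sublist_cons_self x xs) ha)
          (List.Pairwise.sublist (List.sublist_cons_self y ys) hb)]
    rw [← hdrop, List.countP_cons]
    have hpx : (!(y :: ys).contains x) = false := by
      rw [hx]
      rfl
    rw [hpx]
    simp

-- B's sort-and-merge count equals A's count over the dedupe dict's keys
lemma pvCount (src other : List String) :
    mergeMiss (PySem.List.sorted (PySem.Set.ofList src) (fun x => x) false)
              (PySem.List.sorted (PySem.Set.ofList other) (fun x => x) false)
      = ((PySem.Set.ofList src).countP (fun i => !other.contains i) : Nat) := by
  rw [pvMerge _ _ (PySem.List.sorted_ofList_pairwise_lt src) (PySem.List.sorted_ofList_pairwise_lt other)]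
  congr 1
  rw [(PySem.List.sorted_perm (PySem.Set.ofList src) (fun x => x) false).countP_eq
        (fun i => !(PySem.List.sorted (PySem.Set.ofList other) (fun x => x) false).contains i)]
  apply List.countP_congr
  intro z _
  simp [List.contains_eq_mem, PySem.List.mem_sorted, PySem.Set.mem_ofList]

-- ===== VERDICT (by name: the statement is the Claim_ definition above) =====
theorem match_lists_spec : Claim_equal_match_lists := by
  intro name old_list new_list _
  unfold Spec_match_lists match_lists match_lists_alt
  simp only [pvKeys]
  rw [pvLoop, pvLoop, pvCount, pvCount]
  simp [pvContains, PySem.List.dedup_eq_ofList]
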